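-- pv_equiv track=rewrite | github.com/daianabujan/json_etl_python | ejercicios_practica/Ejercicio profundización.py | transform
-- ===== SOURCE A (Python) =====
-- def transform(filtro, min, max):
--
--     # Arma la partición de listas
--     list_min = []
--     list_min_max = []
--     list_max = []
--
--     # Precios por parámetro
--     for datos in filtro :
--         if datos["price"] <= min:
--             list_min.append(datos["price"])
--         elif datos["price"] >= min and datos["price"] <= max:
--             list_min_max.append(datos["price"])
--         else :
--             list_max.append(datos["price"])
--
--     llist_min = len(list_min)
--     llist_min_max = len(list_min_max)
--     llist_max = len(list_max)
--     return[llist_min, llist_min_max, llist_max]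
-- ===== SOURCE B (Python) =====
-- def transform(filtro, min, max):
--     # Three counts instead of one partition loop building three lists:
--     # below and within by independent counting passes, above by arithmetic.
--     below = sum(1 for d in filtro if d["price"] <= min)
--     within = sum(1 for d in filtro if min < d["price"] <= max)
--     return [below, within, len(filtro) - below - within]
-- ===== Notes on version B (the rewrite author's own statement) =====
-- stated objective: idiomatic
-- what changed: Replaces the single partition loop building three price lists (then taking their lengths) with three independent counting passes that never materialise the lists.
import Mathlib
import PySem

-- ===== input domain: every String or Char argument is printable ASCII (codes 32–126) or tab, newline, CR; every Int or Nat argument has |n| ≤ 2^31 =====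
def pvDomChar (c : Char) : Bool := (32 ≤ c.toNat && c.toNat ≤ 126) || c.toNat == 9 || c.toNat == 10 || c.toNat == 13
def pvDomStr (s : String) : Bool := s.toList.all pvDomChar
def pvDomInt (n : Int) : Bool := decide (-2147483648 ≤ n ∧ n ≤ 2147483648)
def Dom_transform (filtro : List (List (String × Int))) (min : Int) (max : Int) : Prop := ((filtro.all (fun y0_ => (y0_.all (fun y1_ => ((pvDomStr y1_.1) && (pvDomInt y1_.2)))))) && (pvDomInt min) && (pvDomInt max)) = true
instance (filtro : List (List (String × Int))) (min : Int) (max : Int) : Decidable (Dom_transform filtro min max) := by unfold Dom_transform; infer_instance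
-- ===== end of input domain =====

-- B replaces A's single partition loop (three appended price lists, then lengths) by two
-- counting passes plus arithmetic for the third bucket; same O(n) cost, more idiomatic.


-- datos["price"]: first-match lookup; exact whenever the key is present (guaranteed by
-- Pre_transform; on a missing key Python raises KeyError, which Pre_ excludes).
def pvPrice (datos : List (String × Int)) : Int := (datos.lookup "price").getD 0

-- ===== PORT A =====
def pvStepA (min max : Int) (s : List Int × List Int × List Int)
    (datos : List (String × Int)) : List Int × List Int × List Int :=
  let p := pvPrice datos
  if p ≤ min then (s.1 ++ [p], s.2.1, s.2.2)
  else if min ≤ p ∧ p ≤ max then (s.1, s.2.1 ++ [p], s.2.2)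
  else (s.1, s.2.1, s.2.2 ++ [p])

def transform (filtro : List (List (String × Int))) (min : Int) (max : Int) : List Int :=
  let r := filtro.foldl (pvStepA min max) ([], [], [])
  [(r.1.length : Int), (r.2.1.length : Int), (r.2.2.length : Int)]

-- ===== PORT B =====
def transform_alt (filtro : List (List (String × Int))) (min : Int) (max : Int) : List Int :=
  let below := filtro.countP (fun d => decide (pvPrice d ≤ min))
  let within := filtro.countP (fun d => decide (min < pvPrice d ∧ pvPrice d ≤ max))
  [(below : Int), (within : Int), (filtro.length : Int) - below - within]

-- ===== PRECONDITION & SPEC =====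
-- Pre_ excludes exactly the inputs where some row lacks a "price" key: there Python A
-- raises KeyError (and B raises too).
def Pre_transform (filtro : List (List (String × Int))) (min : Int) (max : Int) : Prop :=
  (filtro.all (fun d => d.any (fun kv => kv.1 == "price"))) = true
instance (filtro : List (List (String × Int))) (min : Int) (max : Int) : Decidable (Pre_transform filtro min max) := by unfold Pre_transform; infer_instance

def pvWitness_transform : (List (List (String × Int))) × Int × Int :=
  ([[("price", 2)], [("price", 7)]], 0, 5)

def Spec_transform (filtro : List (List (String × Int))) (min : Int) (max : Int) (out : List Int) : Prop := out = transform_alt filtro min max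
instance (filtro : List (List (String × Int))) (min : Int) (max : Int) (out : List Int) : Decidable (Spec_transform filtro min max out) := by unfold Spec_transform; infer_instance

-- ===== CLAIM (what is proved, stated in full; the proofs are below) =====
def Claim_equal_transform : Prop := ∀ (filtro : List (List (String × Int))) (min : Int) (max : Int), Dom_transform filtro min max → Pre_transform filtro min max → Spec_transform filtro min max (transform filtro min max)

-- ===== LEMMAS AND PROOFS =====

-- The three branch conditions of A's loop, as named Bool predicates (proof helpers).
def pvP1 (min : Int) (d : List (String × Int)) : Bool := decide (pvPrice d ≤ min)
def pvP2 (min max : Int) (d : List (String × Int)) : Bool :=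
  decide (¬ pvPrice d ≤ min ∧ min ≤ pvPrice d ∧ pvPrice d ≤ max)
def pvP3 (min max : Int) (d : List (String × Int)) : Bool :=
  decide (¬ pvPrice d ≤ min ∧ ¬ (min ≤ pvPrice d ∧ pvPrice d ≤ max))

-- Invariant of A's partition loop: the lengths of the three accumulated lists grow by the
-- countP of the three branch conditions.
theorem pvFoldA_lengths (min max : Int) :
    ∀ (fil : List (List (String × Int))) (a b c : List Int),
      (fil.foldl (pvStepA min max) (a, b, c)).1.length
          = a.length + fil.countP (pvP1 min) ∧
      (fil.foldl (pvStepA min max) (a, b, c)).2.1.length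
          = b.length + fil.countP (pvP2 min max) ∧
      (fil.foldl (pvStepA min max) (a, b, c)).2.2.length
          = c.length + fil.countP (pvP3 min max) := by
  intro fil
  induction fil with
  | nil => intro a b c; simp
  | cons d t ih =>
    intro a b c
    rw [List.foldl_cons]
    by_cases h1 : pvPrice d ≤ min
    · have hs : pvStepA min max (a, b, c) d = (a ++ [pvPrice d], b, c) := by
        simp [pvStepA, h1]
      have b1 : pvP1 min d = true := by simp [pvP1, h1]
      have b2 : pvP2 min max d = false := by simp [pvP2, h1]
      have b3 : pvP3 min max d = false := by simp [pvP3, h1]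
      obtain ⟨e1, e2, e3⟩ := ih (a ++ [pvPrice d]) b c
      rw [hs]
      refine ⟨?_, ?_, ?_⟩ <;> simp [e1, e2, e3, List.countP_cons, b1, b2, b3] <;> omega
    · by_cases h2 : min ≤ pvPrice d ∧ pvPrice d ≤ max
      · have hs : pvStepA min max (a, b, c) d = (a, b ++ [pvPrice d], c) := by
          simp [pvStepA, h1, h2]
        have b1 : pvP1 min d = false := by simp [pvP1, h1]
        have b2 : pvP2 min max d = true := by simp [pvP2, h1, h2]
        have b3 : pvP3 min max d = false := by simp [pvP3, h1, h2]
        obtain ⟨e1, e2, e3⟩ := ih a (b ++ [pvPrice d]) c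
        rw [hs]
        refine ⟨?_, ?_, ?_⟩ <;> simp [e1, e2, e3, List.countP_cons, b1, b2, b3] <;> omega
      · have hs : pvStepA min max (a, b, c) d = (a, b, c ++ [pvPrice d]) := by
          simp [pvStepA, h1, h2]
        have b1 : pvP1 min d = false := by simp [pvP1, h1]
        have b2 : pvP2 min max d = false := by simp [pvP2, h1, h2]
        have b3 : pvP3 min max d = true := by simp [pvP3, h1, h2]
        obtain ⟨e1, e2, e3⟩ := ih a b (c ++ [pvPrice d])
        rw [hs]
        refine ⟨?_, ?_, ?_⟩ <;> simp [e1, e2, e3, List.countP_cons, b1, b2, b3] <;> omega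

-- The three branch conditions partition every row, so the three counts sum to the length.
theorem pvCounts_sum (min max : Int) (fil : List (List (String × Int))) :
    fil.countP (pvP1 min) + fil.countP (pvP2 min max) + fil.countP (pvP3 min max)
      = fil.length := by
  induction fil with
  | nil => simp
  | cons d t ih =>
    simp only [List.countP_cons, List.length_cons]
    by_cases h1 : pvPrice d ≤ min <;> by_cases h2 : min ≤ pvPrice d ∧ pvPrice d ≤ max <;>
      simp only [pvP1, pvP2, pvP3, h1, h2, decide_true, decide_false, not_true, not_false_iff,
        true_and, false_and, and_true, and_false, if_true, if_false, decide_not] <;>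
      simp [h1, h2] <;> omega

-- A's middle condition (reached after the first branch fails) coincides with B's strict one.
theorem pvMid_congr (min max : Int) (fil : List (List (String × Int))) :
    fil.countP (pvP2 min max) = fil.countP (fun d => decide (min < pvPrice d ∧ pvPrice d ≤ max)) := by
  apply List.countP_congr
  intro d _
  simp [pvP2]
  omega

-- ===== VERDICT (by name: the statement is the Claim_ definition above) =====
theorem transform_spec : Claim_equal_transform := by
  intro filtro min max _ _
  show transform filtro min max = transform_alt filtro min max
  obtain ⟨h1, h2, h3⟩ := pvFoldA_lengths min max filtro [] [] []
  have hsum := pvCounts_sum min max filtro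
  have hmid := pvMid_congr min max filtro
  simp only [transform, transform_alt, h1, h2, h3, List.length_nil, Nat.zero_add,
    List.cons.injEq, and_true]
  have hP1 : (filtro.countP fun d => decide (pvPrice d ≤ min)) = filtro.countP (pvP1 min) := rfl
  refine ⟨rfl, ?_, ?_⟩
  · exact_mod_cast hmid
  · rw [hP1, ← hmid]
    push_cast
    omega
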